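-- pv_equiv track=rewrite | github.com/miquiestampas/Tracer | main_fixed.py | translate_plate_pattern
-- ===== SOURCE A (Python) =====
-- def translate_plate_pattern(pattern: str) -> str:
--     """
--     Traduce un patrón de búsqueda de matrícula amigable a sintaxis SQL.
--     ? -> _ (un carácter cualquiera)
--     * -> % (cero o más caracteres cualquiera)
--     """
--     if not pattern:
--         return pattern
--     # Escapar caracteres especiales de SQL excepto ? y *
--     special_chars = ['%', '_']
--     escaped_pattern = pattern
--     for char in special_chars:
--         escaped_pattern = escaped_pattern.replace(char, f"\\{char}")
--     # Traducir los comodines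
--     translated = escaped_pattern.replace('?', '_').replace('*', '%')
--     return translated
-- ===== SOURCE B (Python) =====
-- def translate_plate_pattern(pattern: str) -> str:
--     # One left-to-right pass over the pattern instead of four whole-string replace passes.
--     out = []
--     for c in pattern:
--         if c == '%' or c == '_':
--             out.append('\\' + c)
--         elif c == '?':
--             out.append('_')
--         elif c == '*':
--             out.append('%')
--         else:
--             out.append(c)
--     return ''.join(out)
-- ===== Notes on version B (the rewrite author's own statement) =====
-- stated objective: alternative
-- what changed: Replaces A's four sequential whole-string str.replace passes with one explicit left-to-right scan that classifies each original character once and joins the pieces.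
import Mathlib
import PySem

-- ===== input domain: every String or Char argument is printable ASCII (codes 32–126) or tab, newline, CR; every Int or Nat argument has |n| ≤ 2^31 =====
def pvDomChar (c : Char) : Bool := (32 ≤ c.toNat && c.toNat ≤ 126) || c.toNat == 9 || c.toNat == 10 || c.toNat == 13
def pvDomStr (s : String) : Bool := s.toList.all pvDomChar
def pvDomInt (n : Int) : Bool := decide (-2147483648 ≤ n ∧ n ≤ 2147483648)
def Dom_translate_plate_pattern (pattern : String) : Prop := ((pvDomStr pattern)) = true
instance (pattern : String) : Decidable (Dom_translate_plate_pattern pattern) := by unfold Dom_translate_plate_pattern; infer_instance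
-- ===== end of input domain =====

-- B replaces A's four sequential str.replace passes with one left-to-right character scan (alternative decomposition, same cost).


-- ===== PORT A =====
def translate_plate_pattern (pattern : String) : String :=
  if pattern = "" then pattern
  else
    -- for char in ['%', '_']: escaped_pattern = escaped_pattern.replace(char, "\\" + char)
    let escaped_pattern :=
      ['%', '_'].foldl
        (fun s ch => PySem.Str.replace s (String.ofList [ch]) (String.ofList ['\\', ch]))
        pattern
    let translated :=
      PySem.Str.replace (PySem.Str.replace escaped_pattern "?" "_") "*" "%"
    translated

-- ===== PORT B =====
def translate_plate_pattern_alt (pattern : String) : String :=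
  String.ofList
    (pattern.toList.flatMap (fun c =>
      if c = '%' || c = '_' then ['\\', c]
      else if c = '?' then ['_']
      else if c = '*' then ['%']
      else [c]))

-- ===== PRECONDITION & SPEC =====
def Spec_translate_plate_pattern (pattern : String) (out : String) : Prop := out = translate_plate_pattern_alt pattern
instance (pattern : String) (out : String) : Decidable (Spec_translate_plate_pattern pattern out) := by unfold Spec_translate_plate_pattern; infer_instance

-- ===== CLAIM (what is proved, stated in full; the proofs are below) =====
def Claim_equal_translate_plate_pattern : Prop := ∀ (pattern : String), Dom_translate_plate_pattern pattern → Spec_translate_plate_pattern pattern (translate_plate_pattern pattern)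

-- ===== LEMMAS AND PROOFS =====

-- Chars.replace with a single-character needle is a per-character flatMap.
lemma replace_go_single (o : Char) (new : List Char) :
    ∀ (fuel : Nat) (l acc : List Char), l.length ≤ fuel →
      PySem.Chars.replace.go [o] new fuel l acc
        = acc.reverse ++ l.flatMap (fun c => if c = o then new else [c]) := by
  intro fuel
  induction fuel with
  | zero =>
    intro l acc h
    have hl : l = [] := by cases l <;> simp_all
    subst hl; simp [PySem.Chars.replace.go]
  | succ n ih =>
    intro l acc h
    cases l with
    | nil => simp [PySem.Chars.replace.go]
    | cons c t =>
      by_cases hc : c = o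
      · subst hc
        simp [PySem.Chars.replace.go, List.isPrefixOf,
          ih t _ (Nat.le_of_succ_le_succ (by simpa using h))]
      · simp [PySem.Chars.replace.go, List.isPrefixOf, hc,
          ih t _ (Nat.le_of_succ_le_succ (by simpa using h))]
        intro h'; exact absurd h'.symm hc

lemma replace_single (o : Char) (new : List Char) (cs : List Char) :
    PySem.Chars.replace cs [o] new = cs.flatMap (fun c => if c = o then new else [c]) := by
  simp [PySem.Chars.replace, replace_go_single o new cs.length cs [] le_rfl]

lemma chain_eq (cs : List Char) :
    PySem.Chars.replace
      (PySem.Chars.replace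
        (PySem.Chars.replace
          (PySem.Chars.replace cs ['%'] ['\\', '%'])
          ['_'] ['\\', '_'])
        ['?'] ['_'])
      ['*'] ['%']
    = cs.flatMap (fun c =>
        if c = '%' || c = '_' then ['\\', c]
        else if c = '?' then ['_']
        else if c = '*' then ['%']
        else [c]) := by
  simp only [replace_single, List.flatMap_assoc]
  apply List.flatMap_congr
  intro c _
  by_cases h1 : c = '%'
  · subst h1; decide
  by_cases h2 : c = '_'
  · subst h2; decide
  by_cases h3 : c = '?'
  · subst h3; decide
  by_cases h4 : c = '*'
  · subst h4; decide
  simp [h1, h2, h3, h4]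

-- ===== VERDICT (by name: the statement is the Claim_ definition above) =====
theorem translate_plate_pattern_spec : Claim_equal_translate_plate_pattern := by
  intro pattern _
  unfold Spec_translate_plate_pattern translate_plate_pattern translate_plate_pattern_alt
  by_cases hp : pattern = ""
  · subst hp; simp
  · simp only [hp, if_false, List.foldl]
    apply String.toList_injective
    rw [PySem.Str.toList_replace, PySem.Str.toList_replace, PySem.Str.toList_replace,
      PySem.Str.toList_replace]
    simp only [String.toList_ofList]
    exact chain_eq pattern.toList
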